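-- pv_equiv track=rewrite | github.com/magedu-python22/homework | homework/04/P22001-beijing-fangfeifei/strSort.py | strSort
-- ===== SOURCE A (Python) =====
-- def strSort(string):
--     lower_str_list = []
--     upper_str_list = []
--     odd_int_list = []
--     even_int_list = []
--     result = ''
--     for s in string:
--         if ord(s) in range(48, 58):
--             if int(s) % 2 == 0 :
--                 even_int_list.append(s)
--             else:
--                 odd_int_list.append(s)
--         elif ord(s) in range(65, 91):
--             upper_str_list.append(s)
--         elif ord(s) in range(97, 123):
--             lower_str_list.append(s)
--
--     return result.join(lower_str_list + upper_str_list + odd_int_list + even_int_list)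
-- ===== SOURCE B (Python) =====
-- def strSort(string):
--     def rank(c):
--         o = ord(c)
--         if 97 <= o < 123:
--             return 0
--         if 65 <= o < 91:
--             return 1
--         if 48 <= o < 58:
--             return 2 if int(c) % 2 else 3
--         return None
--     return ''.join(sorted((c for c in string if rank(c) is not None), key=rank))
-- ===== Notes on version B (the rewrite author's own statement) =====
-- stated objective: idiomatic
-- what changed: Replaces the four explicit bucket lists with one filter plus a single stable sort keyed by category rank (lower=0, upper=1, odd digit=2, even digit=3), relying on sort stability to keep original order within each category.
import Mathlib
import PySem

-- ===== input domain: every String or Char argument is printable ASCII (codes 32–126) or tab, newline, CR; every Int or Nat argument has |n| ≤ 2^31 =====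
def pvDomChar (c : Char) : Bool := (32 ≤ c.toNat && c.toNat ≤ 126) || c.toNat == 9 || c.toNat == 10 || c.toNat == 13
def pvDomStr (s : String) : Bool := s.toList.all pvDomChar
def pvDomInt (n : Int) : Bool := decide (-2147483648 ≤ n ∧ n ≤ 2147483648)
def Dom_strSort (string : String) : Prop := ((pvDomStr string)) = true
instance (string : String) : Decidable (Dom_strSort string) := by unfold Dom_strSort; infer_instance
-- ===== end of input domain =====

-- B replaces A's four explicit bucket lists by one filter plus a single stable sort keyed by category rank.


-- ===== PORT A =====
-- one loop step of A; 'int(s) % 2' for an ASCII digit char is exactly (s.toNat - 48) % 2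
def strSortStep (st : List Char × List Char × List Char × List Char) (s : Char) :
    List Char × List Char × List Char × List Char :=
  if 48 ≤ s.toNat ∧ s.toNat < 58 then
    if (s.toNat - 48) % 2 == 0 then (st.1, st.2.1, st.2.2.1, st.2.2.2 ++ [s])
    else (st.1, st.2.1, st.2.2.1 ++ [s], st.2.2.2)
  else if 65 ≤ s.toNat ∧ s.toNat < 91 then (st.1, st.2.1 ++ [s], st.2.2.1, st.2.2.2)
  else if 97 ≤ s.toNat ∧ s.toNat < 123 then (st.1 ++ [s], st.2.1, st.2.2.1, st.2.2.2)
  else st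

def strSort (string : String) : String :=
  let st := string.toList.foldl strSortStep ([], [], [], [])
  -- ''.join of single-character strings is the concatenation of the characters
  String.ofList (st.1 ++ st.2.1 ++ st.2.2.1 ++ st.2.2.2)

-- ===== PORT B =====
-- B's rank: 0 lower, 1 upper, 2 odd digit, 3 even digit (only applied to kept chars)
def pvRank (c : Char) : Int :=
  if 97 ≤ c.toNat ∧ c.toNat < 123 then 0
  else if 65 ≤ c.toNat ∧ c.toNat < 91 then 1
  else if 48 ≤ c.toNat ∧ c.toNat < 58 then (if c.toNat % 2 == 1 then 2 else 3)
  else 4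

-- B keeps c iff rank(c) is not None in Source B
def pvKeep (c : Char) : Bool :=
  decide (97 ≤ c.toNat ∧ c.toNat < 123) || decide (65 ≤ c.toNat ∧ c.toNat < 91)
    || decide (48 ≤ c.toNat ∧ c.toNat < 58)

def strSort_alt (string : String) : String :=
  String.ofList (PySem.List.sorted (string.toList.filter pvKeep) pvRank)

-- ===== PRECONDITION & SPEC =====
def Spec_strSort (string : String) (out : String) : Prop := out = strSort_alt string
instance (string : String) (out : String) : Decidable (Spec_strSort string out) := by unfold Spec_strSort; infer_instance

-- ===== CLAIM (what is proved, stated in full; the proofs are below) =====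
def Claim_equal_strSort : Prop := ∀ (string : String), Dom_strSort string → Spec_strSort string (strSort string)

-- ===== LEMMAS AND PROOFS =====

-- A's loop collects the four category filters, in order, behind the initial accumulators
lemma strSort_loop (cs : List Char) (l u o e : List Char) :
    cs.foldl strSortStep (l, u, o, e) =
      (l ++ cs.filter (fun c => decide (97 ≤ c.toNat ∧ c.toNat < 123)),
       u ++ cs.filter (fun c => decide (65 ≤ c.toNat ∧ c.toNat < 91)),
       o ++ cs.filter (fun c => decide (48 ≤ c.toNat ∧ c.toNat < 58 ∧ c.toNat % 2 = 1)),
       e ++ cs.filter (fun c => decide (48 ≤ c.toNat ∧ c.toNat < 58 ∧ c.toNat % 2 = 0))) := by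
  induction cs generalizing l u o e with
  | nil => simp
  | cons c cs ih =>
    simp only [List.foldl_cons, List.filter_cons]
    by_cases hd : 48 ≤ c.toNat ∧ c.toNat < 58
    · have b0 : decide (97 ≤ c.toNat ∧ c.toNat < 123) = false := by
        simp only [decide_eq_false_iff_not]; omega
      have b1 : decide (65 ≤ c.toNat ∧ c.toNat < 91) = false := by
        simp only [decide_eq_false_iff_not]; omega
      by_cases hp : ((c.toNat - 48) % 2 == 0) = true
      · have hp0 : c.toNat % 2 = 0 := by
          have := of_decide_eq_true (by simpa using hp); omega
        simp [strSortStep, hd, hp, ih, b0, b1, hp0]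
      · have hp1 : c.toNat % 2 = 1 := by
          have : ¬ (c.toNat - 48) % 2 = 0 := by simpa using hp
          omega
        simp [strSortStep, hd, hp, ih, b0, b1, hp1]
    · have b2 : decide (48 ≤ c.toNat ∧ c.toNat < 58 ∧ c.toNat % 2 = 1) = false := by
        simp only [decide_eq_false_iff_not]; omega
      have b3 : decide (48 ≤ c.toNat ∧ c.toNat < 58 ∧ c.toNat % 2 = 0) = false := by
        simp only [decide_eq_false_iff_not]; omega
      by_cases hu : 65 ≤ c.toNat ∧ c.toNat < 91
      · have b0 : decide (97 ≤ c.toNat ∧ c.toNat < 123) = false := by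
          simp only [decide_eq_false_iff_not]; omega
        simp [strSortStep, hd, hu, ih, b0, b2, b3]
      · have b1 : decide (65 ≤ c.toNat ∧ c.toNat < 91) = false := by
          simp only [decide_eq_false_iff_not]; omega
        by_cases hl : 97 ≤ c.toNat ∧ c.toNat < 123
        · simp [strSortStep, hd, hu, hl, ih, b2, b3]
        · simp [strSortStep, hd, hu, hl, ih, b2, b3]

-- inserting x into ys ++ zs when x goes after all of ys and before all of zs
lemma insertBy_split {α : Type} (before : α → α → Bool) (x : α) (ys zs : List α)
    (hy : ∀ y ∈ ys, before x y = false) (hz : ∀ z ∈ zs, before x z = true) :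
    PySem.List.insertBy before x (ys ++ zs) = ys ++ x :: zs := by
  induction ys with
  | nil =>
    cases zs with
    | nil => simp [PySem.List.insertBy]
    | cons z zs => simp [PySem.List.insertBy, hz z (by simp)]
  | cons y ys ih =>
    have hy0 : before x y = false := hy y (by simp)
    simp only [List.cons_append, PySem.List.insertBy, hy0, Bool.false_eq_true, if_false]
    rw [ih (fun a ha => hy a (by simp [ha]))]

-- the insertion-sort loop keeps the four rank buckets concatenated in rank order
lemma foldl_insert_buckets (ds B0 B1 B2 B3 : List Char)
    (hd : ∀ x ∈ ds, pvKeep x = true)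
    (h0 : ∀ y ∈ B0, pvRank y = 0) (h1 : ∀ y ∈ B1, pvRank y = 1)
    (h2 : ∀ y ∈ B2, pvRank y = 2) (h3 : ∀ y ∈ B3, pvRank y = 3) :
    ds.foldl (fun acc x => PySem.List.insertBy (fun a b => decide (pvRank a < pvRank b)) x acc)
        (B0 ++ B1 ++ B2 ++ B3) =
      (B0 ++ ds.filter (fun c => pvRank c == 0)) ++ (B1 ++ ds.filter (fun c => pvRank c == 1))
        ++ (B2 ++ ds.filter (fun c => pvRank c == 2)) ++ (B3 ++ ds.filter (fun c => pvRank c == 3)) := by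
  induction ds generalizing B0 B1 B2 B3 with
  | nil => simp
  | cons d ds ih =>
    have hk : pvKeep d = true := hd d (by simp)
    have hr : pvRank d = 0 ∨ pvRank d = 1 ∨ pvRank d = 2 ∨ pvRank d = 3 := by
      unfold pvRank
      unfold pvKeep at hk
      split_ifs <;> simp_all
    have hd' : ∀ x ∈ ds, pvKeep x = true := fun x hx => hd x (by simp [hx])
    simp only [List.foldl_cons, List.filter_cons]
    rcases hr with h | h | h | h
    · rw [show B0 ++ B1 ++ B2 ++ B3 = B0 ++ (B1 ++ B2 ++ B3) by simp,
        insertBy_split _ d B0 (B1 ++ B2 ++ B3)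
          (fun y hy => by simp [h, h0 y hy])
          (fun z hz => by
            simp only [List.mem_append] at hz
            rcases hz with (hz | hz) | hz
            · simp [h, h1 z hz]
            · simp [h, h2 z hz]
            · simp [h, h3 z hz]),
        show B0 ++ d :: (B1 ++ B2 ++ B3) = (B0 ++ [d]) ++ B1 ++ B2 ++ B3 by simp]
      rw [ih (B0 ++ [d]) B1 B2 B3 hd'
          (fun y hy => by
            rcases List.mem_append.1 hy with hy | hy
            · exact h0 y hy
            · simp only [List.mem_singleton] at hy; simp [hy, h]) h1 h2 h3]
      simp [h]
    · rw [show B0 ++ B1 ++ B2 ++ B3 = (B0 ++ B1) ++ (B2 ++ B3) by simp,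
        insertBy_split _ d (B0 ++ B1) (B2 ++ B3)
          (fun y hy => by
            rcases List.mem_append.1 hy with hy | hy
            · simp [h, h0 y hy]
            · simp [h, h1 y hy])
          (fun z hz => by
            rcases List.mem_append.1 hz with hz | hz
            · simp [h, h2 z hz]
            · simp [h, h3 z hz]),
        show (B0 ++ B1) ++ d :: (B2 ++ B3) = B0 ++ (B1 ++ [d]) ++ B2 ++ B3 by simp]
      rw [ih B0 (B1 ++ [d]) B2 B3 hd' h0
          (fun y hy => by
            rcases List.mem_append.1 hy with hy | hy
            · exact h1 y hy
            · simp only [List.mem_singleton] at hy; simp [hy, h]) h2 h3]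
      simp [h]
    · rw [show B0 ++ B1 ++ B2 ++ B3 = (B0 ++ B1 ++ B2) ++ B3 by simp,
        insertBy_split _ d (B0 ++ B1 ++ B2) B3
          (fun y hy => by
            simp only [List.mem_append] at hy
            rcases hy with (hy | hy) | hy
            · simp [h, h0 y hy]
            · simp [h, h1 y hy]
            · simp [h, h2 y hy])
          (fun z hz => by simp [h, h3 z hz]),
        show (B0 ++ B1 ++ B2) ++ d :: B3 = B0 ++ B1 ++ (B2 ++ [d]) ++ B3 by simp]
      rw [ih B0 B1 (B2 ++ [d]) B3 hd' h0 h1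
          (fun y hy => by
            rcases List.mem_append.1 hy with hy | hy
            · exact h2 y hy
            · simp only [List.mem_singleton] at hy; simp [hy, h]) h3]
      simp [h]
    · rw [show B0 ++ B1 ++ B2 ++ B3 = (B0 ++ B1 ++ B2 ++ B3) ++ ([] : List Char) by simp,
        insertBy_split _ d (B0 ++ B1 ++ B2 ++ B3) []
          (fun y hy => by
            simp only [List.mem_append] at hy
            rcases hy with ((hy | hy) | hy) | hy
            · simp [h, h0 y hy]
            · simp [h, h1 y hy]
            · simp [h, h2 y hy]
            · simp [h, h3 y hy])
          (fun z hz => by simp at hz),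
        show (B0 ++ B1 ++ B2 ++ B3) ++ d :: ([] : List Char)
            = B0 ++ B1 ++ B2 ++ (B3 ++ [d]) by simp]
      rw [ih B0 B1 B2 (B3 ++ [d]) hd' h0 h1 h2
          (fun y hy => by
            rcases List.mem_append.1 hy with hy | hy
            · exact h3 y hy
            · simp only [List.mem_singleton] at hy; simp [hy, h])]
      simp [h]

-- B's stable sort of the kept characters is the four rank filters concatenated
lemma sorted_eq_buckets (cs : List Char) :
    PySem.List.sorted (cs.filter pvKeep) pvRank =
      (cs.filter pvKeep).filter (fun c => pvRank c == 0)
        ++ (cs.filter pvKeep).filter (fun c => pvRank c == 1)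
        ++ (cs.filter pvKeep).filter (fun c => pvRank c == 2)
        ++ (cs.filter pvKeep).filter (fun c => pvRank c == 3) := by
  rw [PySem.List.sorted_eq_foldl_insertBy]
  have := foldl_insert_buckets (cs.filter pvKeep) [] [] [] []
    (fun x hx => (List.mem_filter.1 hx).2) (by simp) (by simp) (by simp) (by simp)
  simpa using this

-- A's four filters are B's rank filters on the kept characters
lemma filter_rank (cs : List Char) :
    cs.filter (fun c => decide (97 ≤ c.toNat ∧ c.toNat < 123))
        = (cs.filter pvKeep).filter (fun c => pvRank c == 0)
      ∧ cs.filter (fun c => decide (65 ≤ c.toNat ∧ c.toNat < 91))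
        = (cs.filter pvKeep).filter (fun c => pvRank c == 1)
      ∧ cs.filter (fun c => decide (48 ≤ c.toNat ∧ c.toNat < 58 ∧ c.toNat % 2 = 1))
        = (cs.filter pvKeep).filter (fun c => pvRank c == 2)
      ∧ cs.filter (fun c => decide (48 ≤ c.toNat ∧ c.toNat < 58 ∧ c.toNat % 2 = 0))
        = (cs.filter pvKeep).filter (fun c => pvRank c == 3) := by
  refine ⟨?_, ?_, ?_, ?_⟩ <;>
  · rw [List.filter_filter]
    apply List.filter_congr
    intro c _
    unfold pvRank pvKeep
    split_ifs <;> simp_all <;> omega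

-- ===== VERDICT (by name: the statement is the Claim_ definition above) =====
theorem strSort_spec : Claim_equal_strSort := by
  intro s _
  unfold Spec_strSort strSort strSort_alt
  obtain ⟨h0, h1, h2, h3⟩ := filter_rank s.toList
  rw [strSort_loop, sorted_eq_buckets, ← h0, ← h1, ← h2, ← h3]
  simp only [List.nil_append, List.append_assoc]
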